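-- pv_equiv track=rewrite | github.com/mchen07/math-competition | src/crawler/crawl_hmmt_feb.py | parse_name_team
-- ===== SOURCE A (Python) =====
-- def parse_name_team(tail: str) -> tuple[str, str]:
--     """
--     Parse 'Name (Team)' or empty string into (name, team).
--     Handles:
--     - Nested parens in team (e.g. 'Essential Academy1 (Unranked *)')
--     - Parens inside the name (e.g. 'Yibo(Tom) Zhang (Florida Beaches)')
--     """
--     tail = tail.strip()
--     if not tail:
--         return "", ""
--     if not tail.endswith(")"):
--         return tail, ""
--
--     # Find the '(' that matches the final ')', correctly handling nested parens.
--     depth = 0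
--     open_idx = -1
--     for i in range(len(tail) - 1, -1, -1):
--         c = tail[i]
--         if c == ")":
--             depth += 1
--         elif c == "(":
--             depth -= 1
--             if depth == 0:
--                 open_idx = i
--                 break
--
--     if open_idx == -1:
--         # Unbalanced parens; fall back to treating whole tail as name.
--         return tail, ""
--
--     name = tail[:open_idx].strip()
--     team = tail[open_idx + 1 : -1].strip()
--     return name, team
-- ===== SOURCE B (Python) =====
-- def parse_name_team(tail: str) -> tuple[str, str]:
--     """Forward stack-based bracket matcher instead of A's backward depth-counter scan."""
--     tail = tail.strip()
--     if not tail: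
--         return "", ""
--     if not tail.endswith(")"):
--         return tail, ""
--
--     # Match parens left-to-right with a stack of open indices; ignore unmatched ')'.
--     stack = []
--     pairs = []
--     for i, c in enumerate(tail):
--         if c == "(":
--             stack.append(i)
--         elif c == ")":
--             if stack:
--                 pairs.append((stack.pop(), i))
--
--     # The '(' matching the final ')' is the open of the pair closing at len(tail)-1.
--     open_idx = -1
--     for o, cl in pairs:
--         if cl == len(tail) - 1:
--             open_idx = o
--
--     if open_idx == -1:
--         return tail, ""
--     name = tail[:open_idx].strip()
--     team = tail[open_idx + 1 : -1].strip()
--     return name, team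
-- ===== Notes on version B (the rewrite author's own statement) =====
-- stated objective: alternative
-- what changed: Replaces A's backward depth-counter scan for the '(' matching the final ')' with a forward single-pass stack-based bracket matcher that records matched pairs and selects the pair closing at the last index.
import Mathlib
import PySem

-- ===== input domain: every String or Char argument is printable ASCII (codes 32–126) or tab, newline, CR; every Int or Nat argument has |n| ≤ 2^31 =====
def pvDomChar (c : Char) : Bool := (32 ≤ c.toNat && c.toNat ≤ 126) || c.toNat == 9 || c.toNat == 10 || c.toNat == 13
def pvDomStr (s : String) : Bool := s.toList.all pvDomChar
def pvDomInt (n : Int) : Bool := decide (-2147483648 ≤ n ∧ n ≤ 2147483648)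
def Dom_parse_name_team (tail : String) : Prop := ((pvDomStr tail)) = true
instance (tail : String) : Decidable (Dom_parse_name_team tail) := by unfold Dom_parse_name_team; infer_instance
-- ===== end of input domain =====

-- B replaces A's backward depth-counter scan with a forward stack-based bracket matcher; same results, same O(n) cost.

-- ===== PORT A =====
-- A's backward loop: iterates over the reversed character list, i the current index, depth the counter.
def pvALoop : List Char → Int → Int → Int
  | [], _, _ => -1
  | c :: rest, i, depth =>
    if c = ')' then pvALoop rest (i - 1) (depth + 1)
    else if c = '(' then
      (if depth - 1 = 0 then i else pvALoop rest (i - 1) (depth - 1))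
    else pvALoop rest (i - 1) depth

-- 'return name, team' tail of A (name/team slices, or the whole tail when open_idx = -1)
def pvAFinish (t : String) (open_idx : Int) : String × String :=
  if open_idx = -1 then (t, "")
  else
    (String.ofList (PySem.Chars.strip (PySem.Chars.slice t.toList none (some open_idx))),
     String.ofList (PySem.Chars.strip (PySem.Chars.slice t.toList (some (open_idx + 1)) (some (-1)))))

def parse_name_team (tail : String) : String × String :=
  let t := PySem.Str.strip tail
  if PySem.Str.len t = 0 then ("", "")
  else if !(PySem.Str.endswith t ")") then (t, "")
  else pvAFinish t (pvALoop t.toList.reverse ((t.toList.length : Int) - 1) 0)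

-- ===== PORT B =====
-- One step of B's forward matcher: push '(' index, pop and record a pair on ')' (ignored on empty stack).
def pvBStep (acc : List Int × List (Int × Int)) (ic : Int × Char) : List Int × List (Int × Int) :=
  if ic.2 = '(' then (ic.1 :: acc.1, acc.2)
  else if ic.2 = ')' then
    match acc.1 with
    | [] => acc
    | j :: rest => (rest, acc.2 ++ [(j, ic.1)])
  else acc

-- B's pair selection loop: open index of the pair closing at k, else -1
def pvBSelect (pairs : List (Int × Int)) (k : Int) : Int :=
  pairs.foldl (fun acc p => if p.2 = k then p.1 else acc) (-1)

def parse_name_team_alt (tail : String) : String × String :=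
  let t := PySem.Str.strip tail
  if PySem.Str.len t = 0 then ("", "")
  else if !(PySem.Str.endswith t ")") then (t, "")
  else
    let open_idx :=
      pvBSelect ((PySem.List.enumerate t.toList 0).foldl pvBStep ([], [])).2
        ((t.toList.length : Int) - 1)
    if open_idx = -1 then (t, "")
    else
      (String.ofList (PySem.Chars.strip (PySem.Chars.slice t.toList none (some open_idx))),
       String.ofList (PySem.Chars.strip (PySem.Chars.slice t.toList (some (open_idx + 1)) (some (-1)))))

-- ===== PRECONDITION & SPEC =====
def Spec_parse_name_team (tail : String) (out : String × String) : Prop := out = parse_name_team_alt tail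
instance (tail : String) (out : String × String) : Decidable (Spec_parse_name_team tail out) := by unfold Spec_parse_name_team; infer_instance

-- ===== CLAIM (what is proved, stated in full; the proofs are below) =====
def Claim_equal_parse_name_team : Prop := ∀ (tail : String), Dom_parse_name_team tail → Spec_parse_name_team tail (parse_name_team tail)

-- ===== LEMMAS AND PROOFS =====

theorem pvALoop_close (rest : List Char) (i depth : Int) :
    pvALoop (')' :: rest) i depth = pvALoop rest (i - 1) (depth + 1) := by
  simp [pvALoop]

theorem pvALoop_open (rest : List Char) (i depth : Int) :
    pvALoop ('(' :: rest) i depth =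
      if depth - 1 = 0 then i else pvALoop rest (i - 1) (depth - 1) := by
  simp [pvALoop]

theorem pvALoop_other (c : Char) (rest : List Char) (i depth : Int)
    (h1 : ¬ c = ')') (h2 : ¬ c = '(') :
    pvALoop (c :: rest) i depth = pvALoop rest (i - 1) depth := by
  simp [pvALoop, h1, h2]

theorem pvBStep_open (acc : List Int × List (Int × Int)) (i : Int) :
    pvBStep acc (i, '(') = (i :: acc.1, acc.2) := by
  simp [pvBStep]

theorem pvBStep_close_nil (acc : List Int × List (Int × Int)) (i : Int) (h : acc.1 = []) :
    pvBStep acc (i, ')') = acc := by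
  simp [pvBStep, h]

theorem pvBStep_close_cons (acc : List Int × List (Int × Int)) (i j : Int) (rest : List Int)
    (h : acc.1 = j :: rest) :
    pvBStep acc (i, ')') = (rest, acc.2 ++ [(j, i)]) := by
  simp [pvBStep, h]

theorem pvBStep_other (acc : List Int × List (Int × Int)) (i : Int) (c : Char)
    (h1 : ¬ c = ')') (h2 : ¬ c = '(') :
    pvBStep acc (i, c) = acc := by
  simp [pvBStep, h1, h2]

-- the forward-matcher state after processing s
def pvF (s : List Char) : List Int × List (Int × Int) :=
  (PySem.List.enumerate s 0).foldl pvBStep ([], [])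

theorem pvF_append (s : List Char) (c : Char) :
    pvF (s ++ [c]) = pvBStep (pvF s) ((s.length : Int), c) := by
  simp [pvF, PySem.List.enumerate_append, PySem.List.enumerate_cons, List.foldl_append]

-- every recorded close index is < len s, every stack entry is in [0, len s)
theorem pvF_bounds (s : List Char) :
    (∀ p ∈ (pvF s).2, p.2 < (s.length : Int)) ∧
      (∀ j ∈ (pvF s).1, 0 ≤ j ∧ j < (s.length : Int)) := by
  induction s using List.reverseRecOn with
  | nil => simp [pvF, PySem.List.enumerate_nil]
  | append_singleton s c ih =>
    obtain ⟨hp, hs⟩ := ih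
    have hlen : ((s ++ [c]).length : Int) = (s.length : Int) + 1 := by simp
    rw [pvF_append]
    by_cases h1 : c = '('
    · subst h1
      rw [pvBStep_open]
      constructor
      · intro p hp'
        have := hp p hp'; omega
      · intro j hj
        rcases List.mem_cons.mp hj with rfl | hj
      
        · exact ⟨Int.natCast_nonneg _, by omega⟩
        · have := hs j hj; omega
    · by_cases h2 : c = ')'
      · subst h2
        cases hstk : (pvF s).1 with
        | nil =>
          rw [pvBStep_close_nil _ _ hstk]
          constructor
          · intro p hp'
            have := hp p hp'; omega
          · intro j hj
            rw [hstk] at hj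
            simp at hj
        | cons j rest =>
          rw [pvBStep_close_cons _ _ j rest hstk]
          constructor
          · intro p hp'
            rcases List.mem_append.mp hp' with hp' | hp'
            · have := hp p hp'; omega
            · have hpj : p = (j, (s.length : Int)) := by simpa using hp'
              subst hpj; simp
          · intro k hk
            have : k ∈ (pvF s).1 := by rw [hstk]; exact List.mem_cons_of_mem _ hk
            have := hs k this; omega
      · rw [pvBStep_other _ _ _ h2 h1]
        constructor
        · intro p hp'
          have := hp p hp'; omega
        · intro j hj
          have := hs j hj; omega

-- A's backward scan with depth d+1 reads the d-th element (from the top) of B's stack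
theorem pvALoop_stack (s : List Char) (d : Nat) :
    pvALoop s.reverse ((s.length : Int) - 1) ((d : Int) + 1) = ((pvF s).1[d]?).getD (-1) := by
  induction s using List.reverseRecOn generalizing d with
  | nil => simp [pvALoop, pvF, PySem.List.enumerate_nil]
  | append_singleton s c ih =>
    have hrev : (s ++ [c]).reverse = c :: s.reverse := by simp
    have hlen : (((s ++ [c]).length : Int) - 1) = (s.length : Int) := by simp
    rw [hrev, hlen, pvF_append]
    by_cases h1 : c = '('
    · subst h1
      rw [pvALoop_open, pvBStep_open]
      cases d with
      | zero => simp
      | succ d' =>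
        rw [if_neg (by push_cast; omega)]
        have harg : ((((d' + 1) : Nat) : Int) + 1 - 1) = ((d' : Int) + 1) := by push_cast; ring
        have hidx : ((s.length : Int) - 1) = ((s.length : Int) - 1) := rfl
        rw [harg, ih d']
        simp
    · by_cases h2 : c = ')'
      · subst h2
        rw [pvALoop_close]
        have harg : (((d : Nat) : Int) + 1 + 1) = ((((d + 1) : Nat) : Int) + 1) := by push_cast; ring
        rw [harg, ih (d + 1)]
        cases hstk : (pvF s).1 with
        | nil => rw [pvBStep_close_nil _ _ hstk, hstk]; simp
        | cons j rest => rw [pvBStep_close_cons _ _ j rest hstk]; simp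
      · rw [pvALoop_other c _ _ _ h2 h1, pvBStep_other _ _ _ h2 h1, ih d]

-- folding B's pair selection over pairs whose closes all differ from k keeps the accumulator
theorem pvFold_miss (l : List (Int × Int)) (k a : Int) (h : ∀ p ∈ l, p.2 ≠ k) :
    l.foldl (fun acc p => if p.2 = k then p.1 else acc) a = a := by
  induction l generalizing a with
  | nil => rfl
  | cons p rest ih =>
    simp only [List.foldl_cons]
    rw [if_neg (h p (by simp))]
    exact ih a (fun q hq => h q (by simp [hq]))

-- the core: on a list ending in ')', A's scan result equals B's selected open index
theorem pvCore (s : List Char) :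
    pvALoop (s ++ [')']).reverse (((s ++ [')']).length : Int) - 1) 0 =
      pvBSelect (pvF (s ++ [')'])).2 (((s ++ [')']).length : Int) - 1) := by
  have hlen : (((s ++ [')']).length : Int) - 1) = (s.length : Int) := by simp
  have hbnd := (pvF_bounds s).1
  have hA : pvALoop (s ++ [')']).reverse (((s ++ [')']).length : Int) - 1) 0
      = ((pvF s).1[0]?).getD (-1) := by
    have hrev : (s ++ [')']).reverse = ')' :: s.reverse := by simp
    rw [hrev, hlen, pvALoop_close]
    have h0 : ((0 : Int) + 1) = (((0 : Nat) : Int) + 1) := by norm_num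
    rw [h0, pvALoop_stack s 0]
  rw [hA, hlen, pvF_append]
  unfold pvBSelect
  cases hstk : (pvF s).1 with
  | nil =>
    rw [pvBStep_close_nil _ _ hstk]
    rw [pvFold_miss _ _ _ (fun p hp => by have := hbnd p hp; omega)]
    simp
  | cons j rest =>
    rw [pvBStep_close_cons _ _ j rest hstk]
    simp only [List.foldl_append, List.foldl_cons, List.foldl_nil]
    rw [pvFold_miss _ _ _ (fun p hp => by have := hbnd p hp; omega)]
    simp

-- ===== VERDICT (by name: the statement is the Claim_ definition above) =====
set_option maxHeartbeats 1000000 in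
theorem parse_name_team_spec : Claim_equal_parse_name_team := by
  intro tail _
  unfold Spec_parse_name_team parse_name_team parse_name_team_alt
  by_cases h0 : PySem.Str.len (PySem.Str.strip tail) = 0
  · rw [if_pos h0, if_pos h0]
  · rw [if_neg h0, if_neg h0]
    rcases Bool.eq_false_or_eq_true (PySem.Str.endswith (PySem.Str.strip tail) ")") with hE | hE
    swap
    · rw [hE]
      simp
    rw [hE]
    simp only [Bool.not_true, Bool.false_eq_true, if_false]
    have hsuf : (")" : String).toList <:+ (PySem.Str.strip tail).toList := by
      apply (PySem.Chars.endswith_iff _ _).mp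
      rw [← PySem.Str.endswith_eq]
      exact hE
    obtain ⟨s, hs⟩ := hsuf
    have hs' : (PySem.Str.strip tail).toList = s ++ [')'] := by simpa using hs.symm
    have hopen : pvALoop (PySem.Str.strip tail).toList.reverse
          (((PySem.Str.strip tail).toList.length : Int) - 1) 0
        = pvBSelect ((PySem.List.enumerate (PySem.Str.strip tail).toList 0).foldl pvBStep ([], [])).2
          (((PySem.Str.strip tail).toList.length : Int) - 1) := by
      rw [hs']
      exact pvCore s
    rw [hopen]
    unfold pvAFinish
    rfl
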